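-- pv_equiv track=rewrite | github.com/miclaldogan/bantzv2 | src/bantz/memory/omni_memory.py | _rerank_vector_with_graph
-- ===== SOURCE A (Python) =====
-- def _rerank_vector_with_graph(
--     vector_text: str, graph_entities: set[str]
-- ) -> str:
--     """Re-order vector search lines: graph-matching lines first.
--
--     If a vector result mentions an entity found in the graph,
--     it gets promoted to the top of the list.
--     """
--     if not vector_text or not graph_entities:
--         return vector_text
--
--     lines = vector_text.splitlines()
--     header = ""
--     data_lines: list[str] = []
--
--     for line in lines:
--         if line.startswith("Relevant past") or line.startswith("==="):
--             header = line
--         else: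
--             data_lines.append(line)
--
--     if not data_lines:
--         return vector_text
--
--     # Score each line: 1 if it mentions a graph entity, 0 otherwise
--     scored: list[tuple[int, str]] = []
--     for line in data_lines:
--         low = line.lower()
--         boost = 1 if any(ent in low for ent in graph_entities) else 0
--         scored.append((boost, line))
--
--     # Stable sort: boosted lines first, original order preserved
--     scored.sort(key=lambda x: -x[0])
--     result_lines = [s[1] for s in scored]
--
--     if header:
--         return header + "\n" + "\n".join(result_lines)
--     return "\n".join(result_lines)
-- ===== SOURCE B (Python) =====
-- def _rerank_vector_with_graph(
--     vector_text: str, graph_entities: set[str]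
-- ) -> str:
--     """Re-order vector search lines: graph-matching lines first.
--
--     Filter-comprehension formulation: no accumulator loops, no sort.
--     """
--     if not vector_text or not graph_entities:
--         return vector_text
--
--     def is_header(line):
--         return line.startswith("Relevant past") or line.startswith("===")
--
--     def hits(line):
--         low = line.lower()
--         return any(ent in low for ent in graph_entities)
--
--     lines = vector_text.splitlines()
--     headers = [l for l in lines if is_header(l)]
--     data_lines = [l for l in lines if not is_header(l)]
--     if not data_lines:
--         return vector_text
--
--     body = "\n".join([l for l in data_lines if hits(l)]
--                      + [l for l in data_lines if not hits(l)])
--     if headers: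
--         return headers[-1] + "\n" + body
--     return body
-- ===== Notes on version B (the rewrite author's own statement) =====
-- stated objective: simpler
-- what changed: Replaces A's two stateful accumulator loops plus score-tuples-and-stable-sort with a declarative filter formulation: headers and data lines are obtained by two complementary filters (headers[-1] reproduces last-header-wins), and the reordering is two filter comprehensions (matching lines, then the rest) instead of sorting on a negated binary key.
import Mathlib
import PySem

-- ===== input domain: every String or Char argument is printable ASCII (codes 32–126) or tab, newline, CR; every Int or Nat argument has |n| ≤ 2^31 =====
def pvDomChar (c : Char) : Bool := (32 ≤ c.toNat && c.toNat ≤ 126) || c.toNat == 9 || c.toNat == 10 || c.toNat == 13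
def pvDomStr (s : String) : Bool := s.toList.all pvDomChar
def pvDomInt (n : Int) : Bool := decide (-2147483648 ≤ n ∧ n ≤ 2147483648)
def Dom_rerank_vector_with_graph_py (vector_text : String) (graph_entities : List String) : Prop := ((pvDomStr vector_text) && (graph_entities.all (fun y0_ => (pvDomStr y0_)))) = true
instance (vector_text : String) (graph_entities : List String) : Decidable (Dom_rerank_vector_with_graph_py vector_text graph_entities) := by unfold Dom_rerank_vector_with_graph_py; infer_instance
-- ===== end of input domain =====

-- B replaces A's two stateful accumulator loops and its score-then-stable-sort with a
-- declarative filter formulation (complementary filters for headers/data, two filter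
-- comprehensions for the reorder); objective: simpler.

-- ===== PORT A =====
def rerank_vector_with_graph_py (vector_text : String) (graph_entities : List String) : String :=
  if vector_text = "" ∨ graph_entities = [] then vector_text
  else
    let lines := PySem.Str.splitlines vector_text
    let st := lines.foldl (fun (p : String × List String) line =>
      if PySem.Str.startswith line "Relevant past" || PySem.Str.startswith line "===" then
        (line, p.2)
      else (p.1, p.2 ++ [line])) ("", [])
    let header := st.1
    let data_lines := st.2
    if data_lines = [] then vector_text
    else
      let scored := data_lines.foldl (fun (acc : List (Int × String)) line =>
        let low := PySem.Str.lower line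
        let boost : Int := if graph_entities.any (fun ent => PySem.Str.isIn ent low) then 1 else 0
        acc ++ [(boost, line)]) []
      let sortedL := PySem.List.sorted scored (fun x => -x.1) false
      let result_lines := sortedL.map (fun s => s.2)
      if header ≠ "" then header ++ "\n" ++ PySem.Str.join "\n" result_lines
      else PySem.Str.join "\n" result_lines

-- ===== PORT B =====
-- helper is_header: local def in Source B
def pvIsHeader (line : String) : Bool :=
  PySem.Str.startswith line "Relevant past" || PySem.Str.startswith line "==="

-- helper hits: local def in Source B
def pvHits (graph_entities : List String) (line : String) : Bool :=
  let low := PySem.Str.lower line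
  graph_entities.any (fun ent => PySem.Str.isIn ent low)

def rerank_vector_with_graph_py_alt (vector_text : String) (graph_entities : List String) : String :=
  if vector_text = "" ∨ graph_entities = [] then vector_text
  else
    let lines := PySem.Str.splitlines vector_text
    let headers := lines.filter (fun l => pvIsHeader l)
    let data_lines := lines.filter (fun l => !pvIsHeader l)
    if data_lines = [] then vector_text
    else
      let body := PySem.Str.join "\n"
        (data_lines.filter (fun l => pvHits graph_entities l)
          ++ data_lines.filter (fun l => !pvHits graph_entities l))
      -- 'if headers: return headers[-1] + …' — last element exists iff the list is nonempty
      match headers.getLast? with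
      | some h => h ++ "\n" ++ body
      | none => body

-- ===== PRECONDITION & SPEC =====
def Spec_rerank_vector_with_graph_py (vector_text : String) (graph_entities : List String) (out : String) : Prop := out = rerank_vector_with_graph_py_alt vector_text graph_entities
instance (vector_text : String) (graph_entities : List String) (out : String) : Decidable (Spec_rerank_vector_with_graph_py vector_text graph_entities out) := by unfold Spec_rerank_vector_with_graph_py; infer_instance

-- ===== CLAIM (what is proved, stated in full; the proofs are below) =====
def Claim_equal_rerank_vector_with_graph_py : Prop := ∀ (vector_text : String) (graph_entities : List String), Dom_rerank_vector_with_graph_py vector_text graph_entities → Spec_rerank_vector_with_graph_py vector_text graph_entities (rerank_vector_with_graph_py vector_text graph_entities)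

-- ===== LEMMAS AND PROOFS =====

-- A's header/data loop computes (last header (default h0), acc ++ non-header lines).
theorem pvHeaderFold :
    ∀ (xs : List String) (h0 : String) (acc : List String),
      xs.foldl (fun (p : String × List String) line =>
        if PySem.Str.startswith line "Relevant past" || PySem.Str.startswith line "===" then
          (line, p.2)
        else (p.1, p.2 ++ [line])) (h0, acc)
      = (((xs.filter (fun l => pvIsHeader l)).getLast?).getD h0,
          acc ++ xs.filter (fun l => !pvIsHeader l)) := by
  intro xs
  induction xs with
  | nil => intro h0 acc; simp
  | cons x xs ih =>
    intro h0 acc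
    simp only [List.foldl_cons]
    by_cases h : (PySem.Str.startswith x "Relevant past" || PySem.Str.startswith x "===") = true
    · rw [if_pos h, ih]
      have hx : pvIsHeader x = true := h
      simp only [List.filter_cons, hx]
      simp [List.getLast?_cons]
    · rw [if_neg h, ih]
      have hx : pvIsHeader x = false := by simpa [pvIsHeader] using h
      simp [hx]

-- A header line is never the empty string.
theorem pvHeader_ne_empty (h : String) (hh : pvIsHeader h = true) : h ≠ "" := by
  intro he; subst he; exact absurd hh (by decide)

-- insertBy places x after every element it is not "before" and in front of a block
-- it is "before" everywhere.
theorem pvInsertBy_middle {α : Type} (before : α → α → Bool) (x : α) :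
    ∀ (A B : List α), (∀ y ∈ A, before x y = false) → (∀ y ∈ B, before x y = true) →
      PySem.List.insertBy before x (A ++ B) = A ++ x :: B := by
  intro A
  induction A with
  | nil =>
    intro B _ hB
    cases B with
    | nil => simp [PySem.List.insertBy]
    | cons b bs => simp [PySem.List.insertBy, hB b (by simp)]
  | cons a A ih =>
    intro B hA hB
    have ha : before x a = false := hA a (by simp)
    simp only [List.cons_append, PySem.List.insertBy, ha]
    simp [ih B (fun y hy => hA y (by simp [hy])) hB]

-- Stable insertion sort of 0/1-scored pairs on the negated score is the stable partition.
theorem pvSort_aux (P : String → Bool) :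
    ∀ (ys zs : List String),
      ((ys.map (fun l => ((if P l then (1 : Int) else 0), l))).foldl
        (fun acc x => PySem.List.insertBy (fun a b => decide (-a.1 < -b.1)) x acc)
        ((zs.filter P).map (fun l => ((if P l then (1 : Int) else 0), l))
          ++ (zs.filter (fun l => !P l)).map (fun l => ((if P l then (1 : Int) else 0), l))))
      = ((zs ++ ys).filter P).map (fun l => ((if P l then (1 : Int) else 0), l))
        ++ ((zs ++ ys).filter (fun l => !P l)).map (fun l => ((if P l then (1 : Int) else 0), l)) := by
  intro ys
  induction ys with
  | nil => intro zs; simp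
  | cons y ys ih =>
    intro zs
    simp only [List.map_cons, List.foldl_cons]
    by_cases hP : P y = true
    · rw [pvInsertBy_middle (fun a b => decide (-a.1 < -b.1))
        (((if P y then (1 : Int) else 0), y))
        ((zs.filter P).map (fun l => ((if P l then (1 : Int) else 0), l)))
        ((zs.filter (fun l => !P l)).map (fun l => ((if P l then (1 : Int) else 0), l)))
        (by
          intro a ha
          obtain ⟨l, hl, rfl⟩ := List.mem_map.mp ha
          have : P l = true := (List.mem_filter.mp hl).2
          simp [this, hP])
        (by
          intro b hb
          obtain ⟨l, hl, rfl⟩ := List.mem_map.mp hb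
          have : P l = false := by
            have := (List.mem_filter.mp hl).2
            simpa using this
          simp [this, hP])]
      have hrepack :
          (zs.filter P).map (fun l => ((if P l then (1 : Int) else 0), l))
            ++ ((if P y then (1 : Int) else 0), y)
              :: (zs.filter (fun l => !P l)).map (fun l => ((if P l then (1 : Int) else 0), l))
          = ((zs ++ [y]).filter P).map (fun l => ((if P l then (1 : Int) else 0), l))
            ++ ((zs ++ [y]).filter (fun l => !P l)).map (fun l => ((if P l then (1 : Int) else 0), l)) := by
        simp [List.filter_append, hP]
      rw [hrepack, ih (zs ++ [y])]
      simp
    · rw [PySem.List.insertBy_of_forall_not_before _ _ _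
        (by
          intro a ha
          have hP' : P y = false := by simpa using hP
          rcases List.mem_append.mp ha with h | h
          · obtain ⟨l, hl, rfl⟩ := List.mem_map.mp h
            have : P l = true := (List.mem_filter.mp hl).2
            simp [this, hP']
          · obtain ⟨l, hl, rfl⟩ := List.mem_map.mp h
            have : P l = false := by
              have := (List.mem_filter.mp hl).2
              simpa using this
            simp [this, hP'])]
      have hP' : P y = false := by simpa using hP
      have hrepack :
          ((zs.filter P).map (fun l => ((if P l then (1 : Int) else 0), l))
            ++ (zs.filter (fun l => !P l)).map (fun l => ((if P l then (1 : Int) else 0), l)))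
            ++ [((if P y then (1 : Int) else 0), y)]
          = ((zs ++ [y]).filter P).map (fun l => ((if P l then (1 : Int) else 0), l))
            ++ ((zs ++ [y]).filter (fun l => !P l)).map (fun l => ((if P l then (1 : Int) else 0), l)) := by
        simp [List.filter_append, hP']
      rw [hrepack, ih (zs ++ [y])]
      simp

theorem pvSort_partition (P : String → Bool) (xs : List String) :
    (PySem.List.sorted (xs.map (fun l => ((if P l then (1 : Int) else 0), l))) (fun x => -x.1) false).map (fun s => s.2)
    = xs.filter P ++ xs.filter (fun l => !P l) := by
  rw [PySem.List.sorted_eq_foldl_insertBy]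
  have h := pvSort_aux P xs []
  simp only [List.filter_nil, List.map_nil, List.nil_append, List.append_nil] at h
  rw [h]
  simp [List.map_map, Function.comp_def]

theorem pvMain (vt : String) (ge : List String) :
    rerank_vector_with_graph_py vt ge = rerank_vector_with_graph_py_alt vt ge := by
  unfold rerank_vector_with_graph_py rerank_vector_with_graph_py_alt
  by_cases h0 : vt = "" ∨ ge = []
  · simp [h0]
  · simp only [if_neg h0]
    rw [pvHeaderFold]
    simp only [List.nil_append]
    by_cases hd : (PySem.Str.splitlines vt).filter (fun l => !pvIsHeader l) = []
    · simp [hd]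
    · simp only [if_neg hd]
      have hscored :
          ((PySem.Str.splitlines vt).filter (fun l => !pvIsHeader l)).foldl
            (fun (acc : List (Int × String)) line =>
              acc ++ [((if ge.any (fun ent => PySem.Str.isIn ent (PySem.Str.lower line)) then (1 : Int) else 0), line)]) []
          = ((PySem.Str.splitlines vt).filter (fun l => !pvIsHeader l)).map
              (fun l => ((if ge.any (fun ent => PySem.Str.isIn ent (PySem.Str.lower l)) then (1 : Int) else 0), l)) := by
        rw [PySem.List.foldl_append_singleton_eq_map]
        simp
      have hres := pvSort_partition
        (fun line => ge.any (fun ent => PySem.Str.isIn ent (PySem.Str.lower line)))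
        ((PySem.Str.splitlines vt).filter (fun l => !pvIsHeader l))
      simp only [hscored, hres]
      -- unfold B's helper names so both sides are the same inline expressions
      simp only [pvHits]
      -- match the two header branches
      cases hlast : ((PySem.Str.splitlines vt).filter (fun l => pvIsHeader l)).getLast? with
      | none => simp
      | some h =>
        have hmem : h ∈ (PySem.Str.splitlines vt).filter (fun l => pvIsHeader l) :=
          List.mem_of_getLast? hlast
        have hne : h ≠ "" := pvHeader_ne_empty h (by simpa using (List.mem_filter.mp hmem).2)
        simp [hne]

-- ===== VERDICT (by name: the statement is the Claim_ definition above) =====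
theorem rerank_vector_with_graph_py_spec : Claim_equal_rerank_vector_with_graph_py := by
  intro vt ge _
  exact pvMain vt ge
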